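-- pv_equiv track=rewrite | github.com/dragonheart8787/bule-team-firewall | military_ad_lateral_movement.py | _parse_klist_output
-- ===== SOURCE A (Python) =====
-- from typing import Dict, List, Optional, Any, Tuple
--
-- def _parse_klist_output(output: str) -> List[Dict[str, str]]:
--     """解析 klist 輸出"""
--     tickets = []
--     lines = output.split('\n')
--
--     current_ticket = {}
--     for line in lines:
--         if 'Ticket cache:' in line:
--             if current_ticket:
--                 tickets.append(current_ticket)
--             current_ticket = {'cache': line.split(':', 1)[1].strip()}
--         elif 'Default principal:' in line:
--             current_ticket['principal'] = line.split(':', 1)[1].strip()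
--         elif 'Valid starting' in line:
--             current_ticket['valid_from'] = line.split(':', 1)[1].strip()
--         elif 'Expires' in line:
--             current_ticket['expires'] = line.split(':', 1)[1].strip()
--         elif 'renew until' in line:
--             current_ticket['renew_until'] = line.split(':', 1)[1].strip()
--
--     if current_ticket:
--         tickets.append(current_ticket)
--
--     return tickets
-- ===== SOURCE B (Python) =====
-- from typing import Dict, List
--
--
-- def _parse_block(block: List[str]) -> Dict[str, str]:
--     """Apply the ordered field-extraction chain to one block of lines."""
--     ticket = {}
--     for line in block:
--         if 'Ticket cache:' in line:
--             ticket['cache'] = line.split(':', 1)[1].strip()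
--         elif 'Default principal:' in line:
--             ticket['principal'] = line.split(':', 1)[1].strip()
--         elif 'Valid starting' in line:
--             ticket['valid_from'] = line.split(':', 1)[1].strip()
--         elif 'Expires' in line:
--             ticket['expires'] = line.split(':', 1)[1].strip()
--         elif 'renew until' in line:
--             ticket['renew_until'] = line.split(':', 1)[1].strip()
--     return ticket
--
--
-- def _parse_klist_output(output: str) -> List[Dict[str, str]]:
--     # group first: one block per 'Ticket cache:' line, plus the leading block
--     blocks = [[]]
--     for line in output.split('\n'):
--         if 'Ticket cache:' in line:
--             blocks.append([line])
--         else: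
--             blocks[-1].append(line)
--     # then parse each block independently, keeping the non-empty tickets
--     parsed = [_parse_block(b) for b in blocks]
--     return [t for t in parsed if t]
-- ===== Notes on version B (the rewrite author's own statement) =====
-- stated objective: alternative
-- what changed: Replaces A's single pass that threads a current-ticket dict and flushes it at each cache line by a group-then-parse decomposition: one pass only groups the lines into blocks cut at every 'Ticket cache:' line, then an independent per-block parser is mapped over the blocks and empty tickets are filtered out.
import Mathlib
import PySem

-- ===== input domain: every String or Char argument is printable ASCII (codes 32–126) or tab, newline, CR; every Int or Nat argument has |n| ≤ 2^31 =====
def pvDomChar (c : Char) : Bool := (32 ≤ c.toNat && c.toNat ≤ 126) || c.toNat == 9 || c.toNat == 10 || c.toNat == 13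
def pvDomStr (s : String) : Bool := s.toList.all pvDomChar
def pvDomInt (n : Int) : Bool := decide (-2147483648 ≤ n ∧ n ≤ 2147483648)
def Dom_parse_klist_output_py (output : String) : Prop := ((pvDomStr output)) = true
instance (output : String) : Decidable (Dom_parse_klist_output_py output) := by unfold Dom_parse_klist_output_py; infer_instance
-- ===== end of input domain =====

-- B replaces A's single threaded-accumulator pass by a group-then-parse decomposition
-- (cut the lines into blocks at every 'Ticket cache:' line, then map an independent
-- per-block parser and drop empty tickets); same cost, different structure.

-- ===== PORT A =====
-- line.split(':', 1)[1].strip() — the [1] indexing raises IndexError when the line has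
-- no ':'; Pre_ excludes exactly those inputs, so the getD default never fires there.
def pvValue (line : String) : String :=
  PySem.Str.strip (PySem.List.pyGetD ((PySem.Str.splitMax? line ":" 1).getD []) 1 "")

def pvStepA (st : List (PySem.Dict String String) × PySem.Dict String String)
    (line : String) : List (PySem.Dict String String) × PySem.Dict String String :=
  if PySem.Str.isIn "Ticket cache:" line then
    ((if st.2.items.isEmpty then st.1 else st.1 ++ [st.2]),
      PySem.Dict.empty.insert "cache" (pvValue line))
  else if PySem.Str.isIn "Default principal:" line then
    (st.1, st.2.insert "principal" (pvValue line))
  else if PySem.Str.isIn "Valid starting" line then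
    (st.1, st.2.insert "valid_from" (pvValue line))
  else if PySem.Str.isIn "Expires" line then
    (st.1, st.2.insert "expires" (pvValue line))
  else if PySem.Str.isIn "renew until" line then
    (st.1, st.2.insert "renew_until" (pvValue line))
  else st

def parse_klist_output_py (output : String) : List (List (String × String)) :=
  let lines := (PySem.Str.split? output "\n").getD []
  let st := lines.foldl pvStepA ([], PySem.Dict.empty)
  (if st.2.items.isEmpty then st.1 else st.1 ++ [st.2]).map (·.items)

-- ===== PORT B =====
def pvParseLine (t : PySem.Dict String String) (line : String) : PySem.Dict String String :=
  if PySem.Str.isIn "Ticket cache:" line then t.insert "cache" (pvValue line)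
  else if PySem.Str.isIn "Default principal:" line then t.insert "principal" (pvValue line)
  else if PySem.Str.isIn "Valid starting" line then t.insert "valid_from" (pvValue line)
  else if PySem.Str.isIn "Expires" line then t.insert "expires" (pvValue line)
  else if PySem.Str.isIn "renew until" line then t.insert "renew_until" (pvValue line)
  else t

def pvParseBlock (block : List String) : PySem.Dict String String :=
  block.foldl pvParseLine PySem.Dict.empty

-- blocks[-1].append(line)
def pvAppendLast (bs : List (List String)) (line : String) : List (List String) :=
  match bs with
  | [] => []
  | [b] => [b ++ [line]]
  | b :: rest => b :: pvAppendLast rest line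

def pvStepB (bs : List (List String)) (line : String) : List (List String) :=
  if PySem.Str.isIn "Ticket cache:" line then bs ++ [[line]] else pvAppendLast bs line

def parse_klist_output_py_alt (output : String) : List (List (String × String)) :=
  let blocks := ((PySem.Str.split? output "\n").getD []).foldl pvStepB [[]]
  let parsed := blocks.map pvParseBlock
  (parsed.filter (fun t => !t.items.isEmpty)).map (·.items)

-- ===== PRECONDITION & SPEC =====
-- Pre_ excludes exactly the inputs on which the Python A raises IndexError: a line with
-- 'Valid starting' / 'Expires' / 'renew until' (and none of the two earlier markers,
-- which contain ':') but no ':' at all makes line.split(':', 1)[1] fail.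
def Pre_parse_klist_output_py (output : String) : Prop :=
  (((PySem.Str.split? output "\n").getD []).all (fun line =>
    PySem.Str.isIn "Ticket cache:" line || PySem.Str.isIn "Default principal:" line ||
    !(PySem.Str.isIn "Valid starting" line || PySem.Str.isIn "Expires" line ||
      PySem.Str.isIn "renew until" line) ||
    PySem.Str.isIn ":" line)) = true
instance (output : String) : Decidable (Pre_parse_klist_output_py output) := by
  unfold Pre_parse_klist_output_py; infer_instance

def pvWitness_parse_klist_output_py : String :=
  "Ticket cache: a"

def Spec_parse_klist_output_py (output : String) (out : List (List (String × String))) : Prop :=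
  out = parse_klist_output_py_alt output
instance (output : String) (out : List (List (String × String))) :
    Decidable (Spec_parse_klist_output_py output out) := by
  unfold Spec_parse_klist_output_py; infer_instance

-- ===== CLAIM (what is proved, stated in full; the proofs are below) =====
def Claim_equal_parse_klist_output_py : Prop :=
  ∀ (output : String), Dom_parse_klist_output_py output →
    Pre_parse_klist_output_py output →
    Spec_parse_klist_output_py output (parse_klist_output_py output)

-- ===== LEMMAS AND PROOFS =====

lemma pvStepA_noncache (ts : List (PySem.Dict String String)) (cur : PySem.Dict String String)
    (line : String) (h : PySem.Str.isIn "Ticket cache:" line = false) :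
    pvStepA (ts, cur) line = (ts, pvParseLine cur line) := by
  rw [PySem.Str.isIn_eq] at h
  simp only [pvStepA, pvParseLine, PySem.Str.isIn_eq, h, Bool.false_eq_true, if_false]
  split_ifs <;> rfl

lemma pvParseBlock_append (b : List String) (l : String) :
    pvParseBlock (b ++ [l]) = pvParseLine (pvParseBlock b) l := by
  simp [pvParseBlock]

lemma pvParseBlock_cache (l : String) (h : PySem.Str.isIn "Ticket cache:" l = true) :
    pvParseBlock [l] = PySem.Dict.empty.insert "cache" (pvValue l) := by
  simp at h
  simp [pvParseBlock, pvParseLine, h]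

lemma pvAppendLast_ne_nil (bs : List (List String)) (l : String) (h : bs ≠ []) :
    pvAppendLast bs l ≠ [] := by
  cases bs with
  | nil => exact absurd rfl h
  | cons b rest => cases rest <;> simp [pvAppendLast]

lemma pvAppendLast_cons (b : List String) (rest : List (List String)) (l : String)
    (h : rest ≠ []) :
    pvAppendLast (b :: rest) l = b :: pvAppendLast rest l := by
  cases rest with
  | nil => exact absurd rfl h
  | cons c t => rfl

lemma pvAppendLast_append (front bs : List (List String)) (l : String) (h : bs ≠ []) :
    pvAppendLast (front ++ bs) l = front ++ pvAppendLast bs l := by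
  induction front with
  | nil => rfl
  | cons f fr ih =>
      have hne : fr ++ bs ≠ [] := by
        intro hc; exact h (List.append_eq_nil_iff.mp hc).2
      simp only [List.cons_append, pvAppendLast_cons _ _ _ hne, ih]

lemma foldl_pvStepB_append (lines : List String) :
    ∀ (front bs : List (List String)), bs ≠ [] →
      List.foldl pvStepB (front ++ bs) lines = front ++ List.foldl pvStepB bs lines := by
  induction lines with
  | nil => intro front bs _; simp
  | cons l rest ih =>
      intro front bs h
      by_cases hc : PySem.Str.isIn "Ticket cache:" l = true
      · simp only [List.foldl_cons, pvStepB, hc, if_pos, List.append_assoc]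
        exact ih front (bs ++ [[l]]) (by simp)
      · have hc' : PySem.Str.isIn "Ticket cache:" l = false := by
          simpa using hc
        simp only [List.foldl_cons, pvStepB, hc', Bool.false_eq_true,
          pvAppendLast_append front bs l h]
        exact ih front (pvAppendLast bs l) (pvAppendLast_ne_nil bs l h)

lemma pv_main (lines : List String) :
    ∀ (ts : List (PySem.Dict String String)) (b : List String),
      (let st := lines.foldl pvStepA (ts, pvParseBlock b)
       if st.2.items.isEmpty then st.1 else st.1 ++ [st.2])
      = ts ++ ((List.foldl pvStepB [b] lines).map pvParseBlock).filter
          (fun t => !t.items.isEmpty) := by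
  induction lines with
  | nil =>
      intro ts b
      by_cases h : (pvParseBlock b).items.isEmpty <;> simp [h]
  | cons l rest ih =>
      intro ts b
      by_cases hc : PySem.Str.isIn "Ticket cache:" l = true
      · have hA : pvStepA (ts, pvParseBlock b) l =
            ((if (pvParseBlock b).items.isEmpty then ts else ts ++ [pvParseBlock b]),
              pvParseBlock [l]) := by
          rw [pvParseBlock_cache l hc]
          have hcC := hc
          rw [PySem.Str.isIn_eq] at hcC
          simp only [pvStepA, PySem.Str.isIn_eq, hcC, if_true]
        have hB : List.foldl pvStepB [b] (l :: rest) =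
            [b] ++ List.foldl pvStepB [[l]] rest := by
          simp only [List.foldl_cons, pvStepB, hc, if_pos]
          exact foldl_pvStepB_append rest [b] [[l]] (by simp)
        simp only [List.foldl_cons, hA, hB]
        rw [ih (if (pvParseBlock b).items.isEmpty then ts else ts ++ [pvParseBlock b]) [l]]
        by_cases h : (pvParseBlock b).items.isEmpty <;>
          simp [h]
      · have hc' : PySem.Str.isIn "Ticket cache:" l = false := by simpa using hc
        have hA : pvStepA (ts, pvParseBlock b) l = (ts, pvParseBlock (b ++ [l])) := by
          rw [pvStepA_noncache _ _ _ hc', pvParseBlock_append]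
        have hc2 := hc'
        simp at hc2
        have hB : List.foldl pvStepB [b] (l :: rest) =
            List.foldl pvStepB [b ++ [l]] rest := by
          simp [pvStepB, hc2, pvAppendLast]
        simp only [List.foldl_cons, hA, hB]
        exact ih ts (b ++ [l])

-- ===== VERDICT (by name: the statement is the Claim_ definition above) =====
theorem parse_klist_output_py_spec : Claim_equal_parse_klist_output_py := by
  intro output _ _
  unfold Spec_parse_klist_output_py parse_klist_output_py parse_klist_output_py_alt
  have h := pv_main ((PySem.Str.split? output "\n").getD []) [] []
  simp only [pvParseBlock, List.foldl_nil, List.nil_append] at h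
  simp only [h]
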